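-- pv_equiv track=rewrite | github.com/MartinJasso/oirat | tools/leads/generate_leads.py | build_overpass_query
-- ===== SOURCE A (Python) =====
-- SEGMENT_QUERIES = {
--     "dentist": ['node["amenity"="dentist"]', 'way["amenity"="dentist"]', 'relation["amenity"="dentist"]'],
--     "clinic": ['node["amenity"="clinic"]', 'way["amenity"="clinic"]', 'relation["amenity"="clinic"]'],
--     "lawyer": ['node["office"="lawyer"]', 'way["office"="lawyer"]', 'relation["office"="lawyer"]'],
--     "accountant": ['node["office"="accountant"]', 'way["office"="accountant"]', 'relation["office"="accountant"]'],
--     "real_estate": ['node["office"="estate_agent"]', 'way["office"="estate_agent"]', 'relation["office"="estate_agent"]'],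
-- }
--
-- def build_overpass_query(city: str, segment: str, limit: int) -> str:
--     selectors = SEGMENT_QUERIES[segment]
--     area = f'area["name"="{city}"]->.searchArea;'
--     blocks = "\n".join([f"{selector}(area.searchArea);" for selector in selectors])
--     return f"""
-- [out:json][timeout:60];
-- {area}
-- (
-- {blocks}
-- );
-- out tags center {limit};
-- """
-- ===== SOURCE B (Python) =====
-- def build_overpass_query(city: str, segment: str, limit: int) -> str:
--     # Classify the segment into its OSM tag key, rename the one irregular value,
--     # and assemble the whole query as a flat list of lines joined once.
--     if segment in ("dentist", "clinic"):
--         key = "amenity"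
--     elif segment in ("lawyer", "accountant", "real_estate"):
--         key = "office"
--     else:
--         raise KeyError(segment)
--     value = "estate_agent" if segment == "real_estate" else segment
--     lines = [
--         "",
--         "[out:json][timeout:60];",
--         f'area["name"="{city}"]->.searchArea;',
--         "(",
--     ]
--     for elt in ("node", "way", "relation"):
--         lines.append(f'{elt}["{key}"="{value}"](area.searchArea);')
--     lines += [");", f"out tags center {limit};", ""]
--     return "\n".join(lines)
-- ===== Notes on version B (the rewrite author's own statement) =====
-- stated objective: simpler
-- what changed: Drops the selector-string table entirely: B classifies the segment into its tag key by membership, renames the one irregular value (real_estate->estate_agent), and builds the query as a flat list of lines appended in one pass and joined once, instead of A's dict lookup plus inner join spliced into an f-string template.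
import Mathlib
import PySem

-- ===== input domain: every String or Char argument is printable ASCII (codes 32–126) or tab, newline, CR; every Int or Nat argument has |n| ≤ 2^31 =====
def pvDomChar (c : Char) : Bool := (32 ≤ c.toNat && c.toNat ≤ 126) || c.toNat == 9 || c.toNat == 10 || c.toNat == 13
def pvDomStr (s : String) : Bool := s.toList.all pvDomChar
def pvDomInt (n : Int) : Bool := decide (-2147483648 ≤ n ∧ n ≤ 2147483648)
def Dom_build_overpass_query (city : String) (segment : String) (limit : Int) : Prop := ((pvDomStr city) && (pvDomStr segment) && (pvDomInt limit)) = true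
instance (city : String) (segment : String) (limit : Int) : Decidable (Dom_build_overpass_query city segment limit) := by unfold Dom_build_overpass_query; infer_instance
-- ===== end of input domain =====

set_option maxRecDepth 4096


-- B drops the selector table: it classifies the segment into its tag key, renames the one
-- irregular value, and assembles the query as a list of lines joined once (objective: simpler).

-- ===== PORT A =====
def SEGMENT_QUERIES : PySem.Dict String (List String) :=
  PySem.Dict.ofList [
    ("dentist", ["node[\"amenity\"=\"dentist\"]", "way[\"amenity\"=\"dentist\"]", "relation[\"amenity\"=\"dentist\"]"]),
    ("clinic", ["node[\"amenity\"=\"clinic\"]", "way[\"amenity\"=\"clinic\"]", "relation[\"amenity\"=\"clinic\"]"]),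
    ("lawyer", ["node[\"office\"=\"lawyer\"]", "way[\"office\"=\"lawyer\"]", "relation[\"office\"=\"lawyer\"]"]),
    ("accountant", ["node[\"office\"=\"accountant\"]", "way[\"office\"=\"accountant\"]", "relation[\"office\"=\"accountant\"]"]),
    ("real_estate", ["node[\"office\"=\"estate_agent\"]", "way[\"office\"=\"estate_agent\"]", "relation[\"office\"=\"estate_agent\"]"])]

def build_overpass_query (city : String) (segment : String) (limit : Int) : String :=
  let selectors := (PySem.Dict.get? SEGMENT_QUERIES segment).getD []  -- KeyError (none) excluded by Pre_
  let area := "area[\"name\"=\"" ++ city ++ "\"]->.searchArea;"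
  let blocks := PySem.Str.join "\n" (selectors.map (fun selector => selector ++ "(area.searchArea);"))
  "\n[out:json][timeout:60];\n" ++ area ++ "\n(\n" ++ blocks ++ "\n);\nout tags center " ++ PySem.Int.toStr limit ++ ";\n"

-- ===== PORT B =====
def build_overpass_query_alt (city : String) (segment : String) (limit : Int) : String :=
  -- unknown segments (KeyError branch) are excluded by Pre_
  let key := if segment = "dentist" ∨ segment = "clinic" then "amenity" else "office"
  let value := if segment = "real_estate" then "estate_agent" else segment
  let lines :=
    ["", "[out:json][timeout:60];",
     "area[\"name\"=\"" ++ city ++ "\"]->.searchArea;",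
     "("]
    ++ (["node", "way", "relation"].map (fun elt =>
          elt ++ "[\"" ++ key ++ "\"=\"" ++ value ++ "\"](area.searchArea);"))
    ++ [");", "out tags center " ++ PySem.Int.toStr limit ++ ";", ""]
  PySem.Str.join "\n" lines

-- ===== PRECONDITION & SPEC =====
-- Pre_ excludes exactly the segments outside A's table, on which A raises KeyError (B raises too).
def Pre_build_overpass_query (_city : String) (segment : String) (_limit : Int) : Prop :=
  segment ∈ ["dentist", "clinic", "lawyer", "accountant", "real_estate"]
instance (city : String) (segment : String) (limit : Int) : Decidable (Pre_build_overpass_query city segment limit) := by unfold Pre_build_overpass_query; infer_instance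
def pvWitness_build_overpass_query : String × String × Int := ("Paris", "dentist", 50)

def Spec_build_overpass_query (city : String) (segment : String) (limit : Int) (out : String) : Prop := out = build_overpass_query_alt city segment limit
instance (city : String) (segment : String) (limit : Int) (out : String) : Decidable (Spec_build_overpass_query city segment limit out) := by unfold Spec_build_overpass_query; infer_instance

-- ===== CLAIM (what is proved, stated in full; the proofs are below) =====
def Claim_equal_build_overpass_query : Prop := ∀ (city : String) (segment : String) (limit : Int), Dom_build_overpass_query city segment limit → Pre_build_overpass_query city segment limit → Spec_build_overpass_query city segment limit (build_overpass_query city segment limit)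

-- ===== LEMMAS AND PROOFS =====
-- A's table lookup computed once per key (kernel evaluation).
lemma sel_dentist : PySem.Dict.get? SEGMENT_QUERIES "dentist" = some ["node[\"amenity\"=\"dentist\"]", "way[\"amenity\"=\"dentist\"]", "relation[\"amenity\"=\"dentist\"]"] := by decide
lemma sel_clinic : PySem.Dict.get? SEGMENT_QUERIES "clinic" = some ["node[\"amenity\"=\"clinic\"]", "way[\"amenity\"=\"clinic\"]", "relation[\"amenity\"=\"clinic\"]"] := by decide
lemma sel_lawyer : PySem.Dict.get? SEGMENT_QUERIES "lawyer" = some ["node[\"office\"=\"lawyer\"]", "way[\"office\"=\"lawyer\"]", "relation[\"office\"=\"lawyer\"]"] := by decide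
lemma sel_accountant : PySem.Dict.get? SEGMENT_QUERIES "accountant" = some ["node[\"office\"=\"accountant\"]", "way[\"office\"=\"accountant\"]", "relation[\"office\"=\"accountant\"]"] := by decide
lemma sel_real_estate : PySem.Dict.get? SEGMENT_QUERIES "real_estate" = some ["node[\"office\"=\"estate_agent\"]", "way[\"office\"=\"estate_agent\"]", "relation[\"office\"=\"estate_agent\"]"] := by decide

-- ===== VERDICT (by name: the statement is the Claim_ definition above) =====
theorem build_overpass_query_spec : Claim_equal_build_overpass_query := by
  intro city segment limit _ hpre
  unfold Pre_build_overpass_query at hpre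
  unfold Spec_build_overpass_query
  simp only [List.mem_cons, List.not_mem_nil, or_false] at hpre
  rcases hpre with h | h | h | h | h <;> subst h <;>
    · unfold build_overpass_query build_overpass_query_alt
      apply String.toList_injective
      simp [sel_dentist, sel_clinic, sel_lawyer, sel_accountant, sel_real_estate,
            PySem.Str.join, PySem.Chars.join, List.intercalate, List.intersperse]
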